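-- pv_equiv track=rewrite | github.com/KrzysiekSlawik/pylon | src/common/pylos.py | _takeable
-- ===== SOURCE A (Python) =====
-- def _takeable(board, level, player):
--     return [
--         {"x": x, "y": y, "level": level}
--         for x in range(0, 4 - level)
--         for y in range(0, 4 - level)
--         if board[level][x][y] == player
--         and not any(
--             [
--                 board[level + 1][xi][yi]
--                 for xi in range(max(0, x - 1), min(3 - level, x + 1))
--                 for yi in range(max(0, y - 1), min(3 - level, y + 1))
--             ]
--         )
--     ]
-- ===== SOURCE B (Python) =====
-- def _takeable(board, level, player):
--     # One pass over the upper level builds the set of blocked lower positions,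
--     # then one scan of the lower level filters player's unblocked balls.
--     blocked = set()
--     for xi in range(0, 3 - level):
--         row = board[level + 1][xi]
--         for yi in range(0, 3 - level):
--             if row[yi]:
--                 blocked.update(((xi, yi), (xi + 1, yi), (xi, yi + 1), (xi + 1, yi + 1)))
--     return [
--         {"x": x, "y": y, "level": level}
--         for x in range(0, 4 - level)
--         for y in range(0, 4 - level)
--         if board[level][x][y] == player and (x, y) not in blocked
--     ]
-- ===== Notes on version B (the rewrite author's own statement) =====
-- stated objective: alternative
-- what changed: B replaces A's per-cell inner scan of the four supporting upper cells by a single precomputation pass over the upper level that builds a 'blocked' set of covered lower positions, then filters the lower level against that set.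
import Mathlib
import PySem

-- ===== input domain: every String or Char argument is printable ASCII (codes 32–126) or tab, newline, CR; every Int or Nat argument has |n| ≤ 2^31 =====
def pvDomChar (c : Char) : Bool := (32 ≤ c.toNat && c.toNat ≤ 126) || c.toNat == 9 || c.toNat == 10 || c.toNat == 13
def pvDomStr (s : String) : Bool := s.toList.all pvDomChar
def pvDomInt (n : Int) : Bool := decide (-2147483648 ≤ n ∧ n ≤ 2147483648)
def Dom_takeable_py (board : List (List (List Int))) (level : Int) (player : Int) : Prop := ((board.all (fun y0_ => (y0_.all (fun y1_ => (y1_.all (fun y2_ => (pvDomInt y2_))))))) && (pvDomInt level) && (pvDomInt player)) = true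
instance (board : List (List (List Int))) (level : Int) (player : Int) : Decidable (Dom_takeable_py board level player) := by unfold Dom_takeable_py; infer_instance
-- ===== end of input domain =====

-- B replaces A's per-cell scan of the supporting upper cells by one precomputation pass over the
-- upper level building a 'blocked' set of covered lower positions; same output, same order.

-- board[l][x][y] with Python indexing (both ports index only where Pre_ guarantees range)
def pvCell (board : List (List (List Int))) (l x y : Int) : Int :=
  PySem.List.pyGetD (PySem.List.pyGetD (PySem.List.pyGetD board l []) x []) y 0

-- ===== PORT A =====
def takeable_py (board : List (List (List Int))) (level : Int) (player : Int) : List (List (String × Int)) :=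
  (PySem.List.pyRange 0 (4 - level)).foldl (fun acc x =>
    (PySem.List.pyRange 0 (4 - level)).foldl (fun acc y =>
      if pvCell board level x y = player ∧
         ¬ (((PySem.List.pyRange (max 0 (x - 1)) (min (3 - level) (x + 1))).foldl (fun lst xi =>
              (PySem.List.pyRange (max 0 (y - 1)) (min (3 - level) (y + 1))).foldl (fun lst yi =>
                lst ++ [pvCell board (level + 1) xi yi]) lst) ([] : List Int)).any (fun v => v != 0) = true)
      then acc ++ [[("x", x), ("y", y), ("level", level)]] else acc) acc) []

-- ===== PORT B =====
def pvBlocked (board : List (List (List Int))) (level : Int) : PySem.Set (Int × Int) :=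
  (PySem.List.pyRange 0 (3 - level)).foldl (fun s xi =>
    let row := PySem.List.pyGetD (PySem.List.pyGetD board (level + 1) []) xi []
    (PySem.List.pyRange 0 (3 - level)).foldl (fun s yi =>
      if PySem.List.pyGetD row yi 0 != 0 then
        ((((PySem.Set.add s (xi, yi)).add (xi + 1, yi)).add (xi, yi + 1)).add (xi + 1, yi + 1))
      else s) s) PySem.Set.empty

def takeable_py_alt (board : List (List (List Int))) (level : Int) (player : Int) : List (List (String × Int)) :=
  let blocked := pvBlocked board level
  (PySem.List.pyRange 0 (4 - level)).foldl (fun acc x =>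
    (PySem.List.pyRange 0 (4 - level)).foldl (fun acc y =>
      if pvCell board level x y = player ∧ ¬ PySem.Set.contains blocked (x, y) = true
      then acc ++ [[("x", x), ("y", y), ("level", level)]] else acc) acc) []

-- ===== PRECONDITION & SPEC =====
def pvRowsOK (lv : List (List Int)) (n : Nat) : Bool :=
  decide (n ≤ lv.length) && (lv.take n).all (fun r => decide (n ≤ r.length))

def pvPreB (board : List (List (List Int))) (level : Int) : Bool :=
  if 4 ≤ level then true
  else match PySem.List.pyGet? board level with
    | none => false
    | some lw =>
      pvRowsOK lw (4 - level).toNat &&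
      (if level == 3 then true
       else match PySem.List.pyGet? board (level + 1) with
         | none => false
         | some up => pvRowsOK up (3 - level).toNat)

-- Pre_ = both programs return without an IndexError: the levels board[level] and board[level+1]
-- (Python indexing, so negative levels wrap and are admitted) have the rectangular extent the
-- scans may index. It excludes boards whose malformed upper level A happens never to touch
-- because no lower cell equals player (A still returns [] there while B raises; see cite).
def Pre_takeable_py (board : List (List (List Int))) (level : Int) (player : Int) : Prop :=
  pvPreB board level = true
instance (board : List (List (List Int))) (level : Int) (player : Int) : Decidable (Pre_takeable_py board level player) := by unfold Pre_takeable_py; infer_instance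

def pvWitness_takeable_py : List (List (List Int)) × Int × Int :=
  ([[[0,0,0,0],[0,1,0,0],[0,0,0,0],[0,0,0,0]], [[0,0,0],[0,0,0],[0,0,0]], [[0,0],[0,0]], [[0]]], 0, 1)

def Spec_takeable_py (board : List (List (List Int))) (level : Int) (player : Int) (out : List (List (String × Int))) : Prop := out = takeable_py_alt board level player
instance (board : List (List (List Int))) (level : Int) (player : Int) (out : List (List (String × Int))) : Decidable (Spec_takeable_py board level player out) := by unfold Spec_takeable_py; infer_instance

-- ===== CLAIM (what is proved, stated in full; the proofs are below) =====
def Claim_equal_takeable_py : Prop := ∀ (board : List (List (List Int))) (level : Int) (player : Int), Dom_takeable_py board level player → Pre_takeable_py board level player → Spec_takeable_py board level player (takeable_py board level player)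

-- ===== LEMMAS AND PROOFS =====

-- membership in a set built by a fold whose step either leaves the set or adds according to Q
theorem pv_mem_foldl_set {α β : Type} [BEq β] [LawfulBEq β] (l : List α)
    (f : PySem.Set β → α → PySem.Set β) (Q : α → Prop) (p : β)
    (h : ∀ s e, p ∈ f s e ↔ p ∈ s ∨ Q e) :
    ∀ s, p ∈ l.foldl f s ↔ p ∈ s ∨ ∃ e ∈ l, Q e := by
  induction l with
  | nil => simp
  | cons hd tl ih =>
    intro s
    simp only [List.foldl_cons, ih, h, List.mem_cons]
    constructor
    · rintro (((hp | hq) | ⟨e, he, hqe⟩))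
      · exact Or.inl hp
      · exact Or.inr ⟨hd, Or.inl rfl, hq⟩
      · exact Or.inr ⟨e, Or.inr he, hqe⟩
    · rintro (hp | ⟨e, (rfl | he), hqe⟩)
      · exact Or.inl (Or.inl hp)
      · exact Or.inl (Or.inr hqe)
      · exact Or.inr ⟨e, he, hqe⟩

theorem pv_mem_blocked (board : List (List (List Int))) (level : Int) (p : Int × Int) :
    p ∈ pvBlocked board level ↔
      ∃ xi ∈ PySem.List.pyRange 0 (3 - level), ∃ yi ∈ PySem.List.pyRange 0 (3 - level),
        pvCell board (level + 1) xi yi ≠ 0 ∧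
        (p = (xi, yi) ∨ p = (xi + 1, yi) ∨ p = (xi, yi + 1) ∨ p = (xi + 1, yi + 1)) := by
  unfold pvBlocked
  rw [pv_mem_foldl_set _ _
      (fun xi => ∃ yi ∈ PySem.List.pyRange 0 (3 - level),
        pvCell board (level + 1) xi yi ≠ 0 ∧
        (p = (xi, yi) ∨ p = (xi + 1, yi) ∨ p = (xi, yi + 1) ∨ p = (xi + 1, yi + 1))) p ?_]
  · simp [PySem.Set.empty]
  · intro s xi
    rw [pv_mem_foldl_set _ _
        (fun yi => pvCell board (level + 1) xi yi ≠ 0 ∧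
          (p = (xi, yi) ∨ p = (xi + 1, yi) ∨ p = (xi, yi + 1) ∨ p = (xi + 1, yi + 1))) p ?_]
    intro s' yi
    by_cases hc : (PySem.List.pyGetD (PySem.List.pyGetD (PySem.List.pyGetD board (level + 1) []) xi []) yi 0 != 0) = true
    · rw [if_pos hc]
      rw [bne_iff_ne] at hc
      simp only [PySem.Set.mem_add, pvCell]
      tauto
    · rw [if_neg hc]
      rw [bne_iff_ne] at hc
      simp only [pvCell]
      tauto

-- A's inner comprehension, flattened
theorem pv_inner_list (board : List (List (List Int))) (level a b c d : Int) :
    (PySem.List.pyRange a b).foldl (fun lst xi =>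
        (PySem.List.pyRange c d).foldl (fun lst yi =>
          lst ++ [pvCell board (level + 1) xi yi]) lst) ([] : List Int)
      = (PySem.List.pyRange a b).flatMap (fun xi =>
          (PySem.List.pyRange c d).map (fun yi => pvCell board (level + 1) xi yi)) := by
  rw [PySem.List.foldl_congr_mem _ _
      (fun lst xi => lst ++ (PySem.List.pyRange c d).map (fun yi => pvCell board (level + 1) xi yi)) _
      (by intro acc xi _; rw [PySem.List.foldl_append_singleton_eq_map])]
  rw [PySem.List.foldl_append_eq_flatMap]
  simp

-- the two per-cell conditions agree
theorem pv_cond_iff (board : List (List (List Int))) (level x y : Int) :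
    (((PySem.List.pyRange (max 0 (x - 1)) (min (3 - level) (x + 1))).foldl (fun lst xi =>
        (PySem.List.pyRange (max 0 (y - 1)) (min (3 - level) (y + 1))).foldl (fun lst yi =>
          lst ++ [pvCell board (level + 1) xi yi]) lst) ([] : List Int)).any (fun v => v != 0) = true)
    ↔ PySem.Set.contains (pvBlocked board level) (x, y) = true := by
  rw [pv_inner_list]
  rw [show PySem.Set.contains (pvBlocked board level) (x, y) = true
        ↔ (x, y) ∈ pvBlocked board level from by
      simp [PySem.Set.contains]]
  rw [pv_mem_blocked]
  simp only [List.any_eq_true, List.mem_flatMap, List.mem_map, PySem.List.mem_pyRange_one,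
    bne_iff_ne, ne_eq, Prod.mk.injEq]
  constructor
  · rintro ⟨v, ⟨xi, ⟨hx1, hx2⟩, yi, ⟨hy1, hy2⟩, rfl⟩, hv⟩
    refine ⟨xi, by omega, yi, by omega, hv, ?_⟩
    omega
  · rintro ⟨xi, ⟨hx0, hx3⟩, yi, ⟨hy0, hy3⟩, hv, hor⟩
    refine ⟨pvCell board (level + 1) xi yi, ⟨xi, by omega, yi, by omega, rfl⟩, hv⟩

-- ===== VERDICT (by name: the statement is the Claim_ definition above) =====
theorem takeable_py_spec : Claim_equal_takeable_py := by
  intro board level player _ _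
  unfold Spec_takeable_py takeable_py takeable_py_alt
  refine PySem.List.foldl_congr_mem _ _ _ _ ?_
  intro acc x _
  refine PySem.List.foldl_congr_mem _ _ _ _ ?_
  intro acc' y _
  refine if_congr (and_congr_right fun _ => not_congr (pv_cond_iff board level x y)) rfl rfl
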